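-- pv_equiv track=rewrite | github.com/ericmerle3789/Collatz-Junction-Theorem | scripts/research/r62_epsilon_proof.py | build_dlog_table_g
-- ===== SOURCE A (Python) =====
-- def ord_mod(a, p):
--     """Ordre multiplicatif de a modulo p."""
--     if a % p == 0:
--         return 0
--     e, v = 1, a % p
--     while v != 1:
--         v = (v * a) % p
--         e += 1
--         if e > p:
--             return p
--     return e
--
-- def build_dlog_table_g(g, p):
--     """Table de log discret en base g : g^e mod p -> e."""
--     ordr = ord_mod(g, p)
--     tbl = {}
--     v = 1
--     for e in range(ordr):
--         tbl[v] = e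
--         v = (v * g) % p
--     return tbl, ordr
-- ===== SOURCE B (Python) =====
-- def build_dlog_table_g(g, p):
--     """Table de log discret en base g : g^e mod p -> e (single fused loop)."""
--     if g % p == 0:
--         return {}, 0
--     tbl = {}
--     v, e = 1, 0
--     while e < p:
--         tbl[v] = e
--         v = (v * g) % p
--         e += 1
--         if v == 1:
--             return tbl, e
--     return tbl, p
-- ===== Notes on version B (the rewrite author's own statement) =====
-- stated objective: simpler
-- what changed: Replaced A's two-pass design (ord_mod walks the power sequence to find the order, then a second loop rewalks it to fill the table) by one fused loop that stores each power's exponent while discovering the order, with the g % p == 0 case handled up front.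
import Mathlib
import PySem

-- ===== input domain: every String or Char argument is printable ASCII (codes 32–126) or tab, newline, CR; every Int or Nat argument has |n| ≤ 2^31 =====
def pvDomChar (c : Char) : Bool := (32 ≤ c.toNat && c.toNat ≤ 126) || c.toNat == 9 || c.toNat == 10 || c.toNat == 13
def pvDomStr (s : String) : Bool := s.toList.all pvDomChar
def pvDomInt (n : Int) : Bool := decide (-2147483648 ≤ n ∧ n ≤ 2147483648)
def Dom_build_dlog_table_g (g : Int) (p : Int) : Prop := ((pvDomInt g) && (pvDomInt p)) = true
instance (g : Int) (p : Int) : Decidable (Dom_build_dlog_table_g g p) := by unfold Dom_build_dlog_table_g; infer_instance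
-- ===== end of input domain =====

-- B fuses A's two passes (order search, then table fill) into one loop that stores
-- exponents while discovering the order; simpler, same result. Pre_ excludes p = 0,
-- where Python A raises ZeroDivisionError (B raises there too).


-- ===== PORT A =====
-- the 'while v != 1' loop of ord_mod (head check v == 1, then step, then the e > p cap)
def pvOrdLoop (a p : Int) (e v : Int) : Int :=
  if v = 1 then e
  else if e + 1 > p then p
  else pvOrdLoop a p (e + 1) (PySem.Int.mod (v * a) p)
termination_by (p + 1 - e).toNat
decreasing_by omega

def ord_mod (a p : Int) : Int :=
  if PySem.Int.mod a p = 0 then 0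
  else pvOrdLoop a p 1 (PySem.Int.mod a p)

def build_dlog_table_g (g : Int) (p : Int) : (List (Int × Int)) × Int :=
  let ordr := ord_mod g p
  let st := (PySem.List.pyRange 0 ordr 1).foldl
    (fun (s : PySem.Dict Int Int × Int) e => (s.1.insert s.2 e, PySem.Int.mod (s.2 * g) p))
    (PySem.Dict.empty, 1)
  (st.1.items, ordr)

-- ===== PORT B =====
-- the fused 'while e < p' loop: store tbl[v] = e, advance, return (tbl, e) once v is back to 1
def pvAltLoop (g p : Int) (tbl : PySem.Dict Int Int) (v e : Int) : PySem.Dict Int Int × Int :=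
  if e < p then
    if PySem.Int.mod (v * g) p = 1 then (tbl.insert v e, e + 1)
    else pvAltLoop g p (tbl.insert v e) (PySem.Int.mod (v * g) p) (e + 1)
  else (tbl, p)
termination_by (p - e).toNat
decreasing_by omega

def build_dlog_table_g_alt (g : Int) (p : Int) : (List (Int × Int)) × Int :=
  if PySem.Int.mod g p = 0 then (([] : List (Int × Int)), 0)
  else
    let st := pvAltLoop g p PySem.Dict.empty 1 0
    (st.1.items, st.2)

-- ===== PRECONDITION & SPEC =====
-- p = 0 makes every '% p' in A raise ZeroDivisionError
def Pre_build_dlog_table_g (_g : Int) (p : Int) : Prop := p ≠ 0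
instance (g : Int) (p : Int) : Decidable (Pre_build_dlog_table_g g p) := by unfold Pre_build_dlog_table_g; infer_instance
def pvWitness_build_dlog_table_g : Int × Int := (2, 11)

def Spec_build_dlog_table_g (g : Int) (p : Int) (out : (List (Int × Int)) × Int) : Prop := out = build_dlog_table_g_alt g p
instance (g : Int) (p : Int) (out : (List (Int × Int)) × Int) : Decidable (Spec_build_dlog_table_g g p out) := by unfold Spec_build_dlog_table_g; infer_instance

-- ===== CLAIM (what is proved, stated in full; the proofs are below) =====
def Claim_equal_build_dlog_table_g : Prop := ∀ (g : Int) (p : Int), Dom_build_dlog_table_g g p → Pre_build_dlog_table_g g p → Spec_build_dlog_table_g g p (build_dlog_table_g g p)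

-- ===== LEMMAS AND PROOFS =====

-- the ord loop never returns less than its counter (while the counter is within the cap)
theorem pvOrdLoop_ge (a p e v : Int) (he : e ≤ p) : e ≤ pvOrdLoop a p e v := by
  rw [pvOrdLoop]
  split
  · omega
  split
  · omega
  next h h2 =>
    have := pvOrdLoop_ge a p (e + 1) (PySem.Int.mod (v * a) p) (by omega)
    omega
termination_by (p + 1 - e).toNat
decreasing_by omega

-- the fused loop, entered at counter c with current value v ≠ 1, equals A's table fold
-- over range(c, R) paired with R, where R is what A's ord loop returns from the same state
theorem pvAltLoop_eq (g p : Int) (tbl : PySem.Dict Int Int) (v c : Int) (hv : v ≠ 1) :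
    pvAltLoop g p tbl v c =
      ( ((PySem.List.pyRange c (pvOrdLoop g p c v) 1).foldl
          (fun (s : PySem.Dict Int Int × Int) e => (s.1.insert s.2 e, PySem.Int.mod (s.2 * g) p))
          (tbl, v)).1,
        pvOrdLoop g p c v ) := by
  rw [pvAltLoop]
  conv_rhs => rw [pvOrdLoop]
  simp only [if_neg hv]
  by_cases hc : c < p
  · simp only [if_pos hc, if_neg (by omega : ¬ (c + 1 > p))]
    by_cases hv1 : PySem.Int.mod (v * g) p = 1
    · -- v' = 1 : B returns (tbl.insert v c, c + 1); the remaining ord loop returns c + 1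
      simp only [if_pos hv1]
      rw [pvOrdLoop]
      simp only [if_pos hv1]
      rw [PySem.List.pyRange_one_cons (by omega : c < c + 1)]
      have h0 : (c + 1 - (c + 1)).toNat = 0 := by omega
      simp [hv1]
    · -- v' ≠ 1 : take one step, then recurse at (tbl.insert v c, v', c + 1)
      simp only [if_neg hv1]
      have hR : c + 1 ≤ pvOrdLoop g p (c + 1) (PySem.Int.mod (v * g) p) :=
        pvOrdLoop_ge g p (c + 1) _ (by omega)
      rw [PySem.List.pyRange_one_cons (by omega :
        c < pvOrdLoop g p (c + 1) (PySem.Int.mod (v * g) p))]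
      simp only [List.foldl_cons]
      exact pvAltLoop_eq g p (tbl.insert v c) (PySem.Int.mod (v * g) p) (c + 1) hv1
  · -- c ≥ p : B returns (tbl, p); the ord loop caps at p; range(c, p) is empty
    simp only [if_neg hc, if_pos (by omega : c + 1 > p)]
    have h0 : (p - c).toNat = 0 := by omega
    simp [PySem.List.pyRange_one, h0]
termination_by (p - c).toNat
decreasing_by omega

-- ===== VERDICT (by name: the statement is the Claim_ definition above) =====
theorem build_dlog_table_g_spec : Claim_equal_build_dlog_table_g := by
  intro g p _ hp
  have hp0 : p ≠ 0 := hp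
  unfold Spec_build_dlog_table_g build_dlog_table_g build_dlog_table_g_alt ord_mod
  by_cases hz : PySem.Int.mod g p = 0
  · simp [hz, PySem.Dict.empty]
  · simp only [if_neg hz]
    by_cases hpos : 0 < p
    · -- p ≥ 1 : B enters the loop; peel A's fold at e = 0
      rw [pvAltLoop]
      simp only [if_pos hpos, one_mul]
      by_cases hv1 : PySem.Int.mod g p = 1
      · -- order is 1
        rw [pvOrdLoop]
        simp only [if_pos hv1]
        rw [PySem.List.pyRange_one_cons (by omega : (0 : Int) < 1)]
        have h0 : ((1 : Int) - 1).toNat = 0 := by omega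
        simp [hv1]
      · simp only [if_neg hv1]
        rw [pvAltLoop_eq g p _ _ _ hv1]
        have hR : 1 ≤ pvOrdLoop g p 1 (PySem.Int.mod g p) :=
          pvOrdLoop_ge g p 1 _ (by omega)
        rw [PySem.List.pyRange_one_cons
          (by omega : (0 : Int) < pvOrdLoop g p 1 (PySem.Int.mod g p))]
        simp [one_mul]
    · -- p < 0 : v = g % p lies in (p, 0], so v ≠ 1 and the cap fires at once; both empty
      have hb := PySem.Int.mod_neg_bounds g (by omega : p < 0)
      have hv : PySem.Int.mod g p ≠ 1 := by omega
      rw [pvAltLoop]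
      simp only [if_neg (by omega : ¬ (0 : Int) < p)]
      rw [pvOrdLoop]
      simp only [if_neg hv, if_pos (by omega : (1 : Int) + 1 > p)]
      have h0 : p.toNat = 0 := by omega
      simp [PySem.List.pyRange_one, h0]
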